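-- pv_equiv track=rewrite | github.com/David-S-Hunsicker/learningpython | Graphs/count_basins.py | find_basins
-- ===== SOURCE A (Python) =====
-- from collections import defaultdict
--
-- def find_basins(matrix):
--     # every cell tries to find the lowest
--     # if a cell sees itself is the lowest then it adds itself to basins dictionary (cell x, y : count)
--     # if a cell has a neighbor that has is in flow_to (x ,y ) ( lowest_x, lowest_y) then it takes that and increments lowest(x,y)
--     flow_to = {}
--     basins = defaultdict(int)
--
--     def get_neighbors(cell):
--         x, y = cell
--         possible = [(x + 1, y), (x - 1, y), (x, y + 1), (x, y - 1)]
--         neighbors = []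
--         for n_x, n_y in possible:
--             if n_x >= 0 and n_y >= 0 and n_x < len(matrix) and n_y < len(matrix[x]):
--                 neighbors.append((n_x, n_y))
--         return neighbors
--
--     def find_basin(cell):
--         lowest = cell
--         neighbors = get_neighbors(cell)
--         for neighbor in neighbors:
--             if matrix[neighbor[0]][neighbor[1]] < matrix[lowest[0]][lowest[1]]:  # neighbor is lower
--                 lowest = neighbor
--         if lowest == cell:  # this cell is a basin
--             return cell
--         else:
--             flow_to[cell] = find_basin(lowest)
--             return flow_to[cell]
--
--     for row in range(len(matrix)):
--         for col in range(len(matrix[row])):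
--             basin = find_basin((row, col))
--             # if (row, col) not in basins:
--             basins[basin] += 1
--
--     results = []
--     for key, values in basins.items():
--         results.append(values)
--
--     return sorted(results)
-- ===== SOURCE B (Python) =====
-- def find_basins(matrix):
--     # Memoized: each cell's basin is cached in `root` (with path compression),
--     # so every cell's flow chain is walked only once overall.
--     n = len(matrix)
--     root = {}
--     counts = {}
--     for row in range(n):
--         for col in range(len(matrix[row])):
--             cell = (row, col)
--             path = []
--             while cell not in root:
--                 x, y = cell
--                 best = cell
--                 for nx, ny in ((x + 1, y), (x - 1, y), (x, y + 1), (x, y - 1)):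
--                     if 0 <= nx < n and 0 <= ny < len(matrix[x]) and matrix[nx][ny] < matrix[best[0]][best[1]]:
--                         best = (nx, ny)
--                 if best == cell:
--                     root[cell] = cell
--                 else:
--                     path.append(cell)
--                     cell = best
--             b = root[cell]
--             for c in path:
--                 root[c] = b
--             counts[b] = counts.get(b, 0) + 1
--     return sorted(counts.values())
-- ===== Notes on version B (the rewrite author's own statement) =====
-- stated objective: faster
-- what changed: B replaces A's per-cell recursive steepest-descent (whose flow_to cache is written but never read, so every cell re-walks its whole descent chain) by one iterative walk per cell with a genuinely used memo dict and path compression, counting basins in the same pass.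
import Mathlib
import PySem

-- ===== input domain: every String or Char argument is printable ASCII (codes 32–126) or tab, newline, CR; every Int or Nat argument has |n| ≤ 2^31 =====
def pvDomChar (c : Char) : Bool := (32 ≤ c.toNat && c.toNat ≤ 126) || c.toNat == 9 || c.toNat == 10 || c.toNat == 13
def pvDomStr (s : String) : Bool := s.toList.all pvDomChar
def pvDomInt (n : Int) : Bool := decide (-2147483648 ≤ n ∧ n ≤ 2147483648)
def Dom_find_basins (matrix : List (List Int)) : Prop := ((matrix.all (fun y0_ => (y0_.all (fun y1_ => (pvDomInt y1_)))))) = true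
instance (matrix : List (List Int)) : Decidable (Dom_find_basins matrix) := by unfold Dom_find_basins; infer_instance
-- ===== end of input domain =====

-- B replaces A's repeated per-cell steepest-descent recursion (whose flow_to cache is written but
-- never read) by a single memoized walk with path compression: asymptotically faster on grids with
-- long descent chains. A's flow_to dict is write-only, so it is not threaded through port A.

-- ===== PORT A =====
-- len(matrix[x]) (x always in range at use sites inside Pre_)
def pvRowLen (m : List (List Int)) (x : Int) : Int := ((PySem.List.pyGetD m x []).length : Int)
-- matrix[x][y] (indices always checked in range before access inside Pre_)
def pvVal (m : List (List Int)) (x y : Int) : Int := PySem.List.pyGetD (PySem.List.pyGetD m x []) y 0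

def pvNeighbors (m : List (List Int)) (cell : Int × Int) : List (Int × Int) :=
  ([(cell.1 + 1, cell.2), (cell.1 - 1, cell.2), (cell.1, cell.2 + 1), (cell.1, cell.2 - 1)] :
      List (Int × Int)).foldl
    (fun acc p =>
      if 0 ≤ p.1 ∧ 0 ≤ p.2 ∧ p.1 < (m.length : Int) ∧ p.2 < pvRowLen m cell.1 then acc ++ [p]
      else acc) []

-- fuel bound for the descent recursion (a totality guard only: the chain of strictly
-- decreasing values never revisits a cell, so its length is at most the number of cells)
def pvFuel (m : List (List Int)) : Nat := (m.map List.length).sum + 1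

def pvFindBasinA (m : List (List Int)) : Nat → (Int × Int) → Int × Int
  | 0, cell => cell   -- fuel guard, never reached with the caller's fuel
  | fuel + 1, cell =>
    let lowest := (pvNeighbors m cell).foldl
      (fun lowest nb => if pvVal m nb.1 nb.2 < pvVal m lowest.1 lowest.2 then nb else lowest) cell
    if lowest = cell then cell else pvFindBasinA m fuel lowest

def find_basins (matrix : List (List Int)) : List Int :=
  let basins := (PySem.List.pyRange 0 (matrix.length : Int) 1).foldl (fun basins row =>
      (PySem.List.pyRange 0 (pvRowLen matrix row) 1).foldl (fun basins col =>
        basins.modify (pvFindBasinA matrix (pvFuel matrix) (row, col)) 0 (· + 1)) basins)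
    (PySem.Dict.empty : PySem.Dict (Int × Int) Int)
  let results := basins.items.foldl (fun res kv => res ++ [kv.2]) []
  PySem.List.sorted results (fun v => v) false

-- ===== PORT B =====
def pvBest (m : List (List Int)) (cell : Int × Int) : Int × Int :=
  ([(cell.1 + 1, cell.2), (cell.1 - 1, cell.2), (cell.1, cell.2 + 1), (cell.1, cell.2 - 1)] :
      List (Int × Int)).foldl
    (fun best p =>
      if 0 ≤ p.1 ∧ p.1 < (m.length : Int) ∧ 0 ≤ p.2 ∧ p.2 < pvRowLen m cell.1 ∧
          pvVal m p.1 p.2 < pvVal m best.1 best.2 then p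
      else best) cell

-- the while-loop of B: walk until a memoized cell or a local minimum, then write the
-- basin back along the recorded path (path compression)
def pvWalkB (m : List (List Int)) :
    Nat → PySem.Dict (Int × Int) (Int × Int) → (Int × Int) → List (Int × Int) →
    PySem.Dict (Int × Int) (Int × Int) × (Int × Int)
  | 0, root, cell, _path => (root, cell)   -- fuel guard, never reached with the caller's fuel
  | fuel + 1, root, cell, path =>
    match root.get? cell with
    | some b => (path.foldl (fun r c => r.insert c b) root, b)
    | none =>
      let best := pvBest m cell
      if best = cell then
        (path.foldl (fun r c => r.insert c cell) (root.insert cell cell), cell)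
      else pvWalkB m fuel root best (path ++ [cell])

def find_basins_alt (matrix : List (List Int)) : List Int :=
  let st := (PySem.List.pyRange 0 (matrix.length : Int) 1).foldl (fun st row =>
      (PySem.List.pyRange 0 (pvRowLen matrix row) 1).foldl (fun st col =>
        let w := pvWalkB matrix (pvFuel matrix) st.1 (row, col) []
        (w.1, st.2.insert w.2 (st.2.getD w.2 0 + 1))) st)
    ((PySem.Dict.empty : PySem.Dict (Int × Int) (Int × Int)),
     (PySem.Dict.empty : PySem.Dict (Int × Int) Int))
  PySem.List.sorted st.2.values (fun v => v) false

-- ===== PRECONDITION & SPEC =====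
-- Pre_ = rectangular matrix: on any ragged matrix A raises IndexError (a vertical neighbor is
-- bounds-checked against the current row's length, then indexed in its own, shorter row).
def Pre_find_basins (matrix : List (List Int)) : Prop :=
  ∀ r ∈ matrix, r.length = (matrix.headD []).length
instance (matrix : List (List Int)) : Decidable (Pre_find_basins matrix) := by
  unfold Pre_find_basins; infer_instance

def pvWitness_find_basins : List (List Int) := [[1, 2], [3, 0]]

def Spec_find_basins (matrix : List (List Int)) (out : List Int) : Prop := out = find_basins_alt matrix
instance (matrix : List (List Int)) (out : List Int) : Decidable (Spec_find_basins matrix out) := by unfold Spec_find_basins; infer_instance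

-- ===== CLAIM (what is proved, stated in full; the proofs are below) =====
def Claim_equal_find_basins : Prop := ∀ (matrix : List (List Int)), Dom_find_basins matrix → Pre_find_basins matrix → Spec_find_basins matrix (find_basins matrix)

-- ===== LEMMAS AND PROOFS =====

-- the grid's cells, row-major (the traversal order of both main loops)
def pvCells (m : List (List Int)) : List (Int × Int) :=
  (List.range m.length).flatMap
    (fun i => (List.range (m.getD i []).length).map (fun j => ((i : Int), (j : Int))))

-- termination measure of the descent: number of cells with strictly smaller value
def pvRank (m : List (List Int)) (c : Int × Int) : Nat :=
  ((pvCells m).filter (fun p => decide (pvVal m p.1 p.2 < pvVal m c.1 c.2))).length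

-- dict-free form of A's recursion
def pvChase (m : List (List Int)) : Nat → (Int × Int) → Int × Int
  | 0, c => c
  | f + 1, c => if pvBest m c = c then c else pvChase m f (pvBest m c)

def pvBasin (m : List (List Int)) (c : Int × Int) : Int × Int := pvChase m (pvFuel m) c

def pvKeyList (m : List (List Int)) : List (Int × Int) := (pvCells m).map (pvBasin m)

-- memo invariant of B's root dict
def pvInv (m : List (List Int)) (root : PySem.Dict (Int × Int) (Int × Int)) : Prop :=
  ∀ c b, root.get? c = some b → b = pvBasin m c

lemma pvLowest_eq_best (m : List (List Int)) (c : Int × Int) :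
    (pvNeighbors m c).foldl
      (fun lowest nb => if pvVal m nb.1 nb.2 < pvVal m lowest.1 lowest.2 then nb else lowest) c
      = pvBest m c := by
  unfold pvNeighbors pvBest
  have hfun : (fun (acc : List (Int × Int)) (p : Int × Int) =>
        if 0 ≤ p.1 ∧ 0 ≤ p.2 ∧ p.1 < (m.length : Int) ∧ p.2 < pvRowLen m c.1 then acc ++ [p]
        else acc)
      = (fun (acc : List (Int × Int)) (p : Int × Int) =>
        if (decide (0 ≤ p.1 ∧ 0 ≤ p.2 ∧ p.1 < (m.length : Int) ∧ p.2 < pvRowLen m c.1)) = true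
        then acc ++ [p] else acc) := by
    funext acc p; simp
  rw [hfun, PySem.List.foldl_append_if
    (fun p : Int × Int => decide (0 ≤ p.1 ∧ 0 ≤ p.2 ∧ p.1 < (m.length : Int) ∧ p.2 < pvRowLen m c.1))
    (fun p : Int × Int => p)]
  simp only [List.map_id', List.nil_append]
  rw [List.foldl_filter]
  have hfun2 : (fun (b : Int × Int) (p : Int × Int) =>
        if (decide (0 ≤ p.1 ∧ 0 ≤ p.2 ∧ p.1 < (m.length : Int) ∧ p.2 < pvRowLen m c.1)) = true
        then (if pvVal m p.1 p.2 < pvVal m b.1 b.2 then p else b) else b)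
      = (fun (b : Int × Int) (p : Int × Int) =>
        if 0 ≤ p.1 ∧ p.1 < (m.length : Int) ∧ 0 ≤ p.2 ∧ p.2 < pvRowLen m c.1 ∧
            pvVal m p.1 p.2 < pvVal m b.1 b.2 then p else b) := by
    funext b p
    simp only [decide_eq_true_eq]
    split_ifs <;> tauto
  rw [hfun2]

lemma pvFindBasinA_eq_chase (m : List (List Int)) :
    ∀ (f : Nat) (c : Int × Int), pvFindBasinA m f c = pvChase m f c := by
  intro f
  induction f with
  | zero => intro c; rfl
  | succ f ih =>
    intro c
    simp only [pvFindBasinA, pvChase]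
    rw [pvLowest_eq_best]
    split_ifs with h
    · rfl
    · exact ih _

lemma mem_pvCells (m : List (List Int)) (p : Int × Int) :
    p ∈ pvCells m ↔ ∃ i j : Nat, i < m.length ∧ j < (m.getD i []).length ∧ p = ((i : Int), (j : Int)) := by
  simp only [pvCells, List.mem_flatMap, List.mem_map, List.mem_range]
  aesop

lemma pvRowLen_const (m : List (List Int)) (hPre : Pre_find_basins m)
    (i : Nat) (hi : i < m.length) : (m.getD i []).length = (m.headD []).length := by
  have : m.getD i [] ∈ m := by
    rw [List.getD_eq_getElem m [] hi]; exact List.getElem_mem hi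
  exact hPre _ this

lemma pvBestFoldAux (m : List (List Int)) (c : Int × Int) :
    ∀ (l : List (Int × Int)) (b0 : Int × Int),
      (b0 = c ∨ (0 ≤ b0.1 ∧ b0.1 < (m.length : Int) ∧ 0 ≤ b0.2 ∧ b0.2 < pvRowLen m c.1 ∧
        pvVal m b0.1 b0.2 < pvVal m c.1 c.2)) →
      ∀ r, r = l.foldl (fun best p =>
          if 0 ≤ p.1 ∧ p.1 < (m.length : Int) ∧ 0 ≤ p.2 ∧ p.2 < pvRowLen m c.1 ∧
              pvVal m p.1 p.2 < pvVal m best.1 best.2 then p else best) b0 →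
      (r = c ∨ (0 ≤ r.1 ∧ r.1 < (m.length : Int) ∧ 0 ≤ r.2 ∧ r.2 < pvRowLen m c.1 ∧
        pvVal m r.1 r.2 < pvVal m c.1 c.2)) := by
  intro l
  induction l with
  | nil => intro b0 h r hr; rw [List.foldl_nil] at hr; exact hr ▸ h
  | cons p ps ih =>
    intro b0 h r hr
    rw [List.foldl_cons] at hr
    by_cases hcond : 0 ≤ p.1 ∧ p.1 < (m.length : Int) ∧ 0 ≤ p.2 ∧ p.2 < pvRowLen m c.1 ∧
        pvVal m p.1 p.2 < pvVal m b0.1 b0.2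
    · rw [if_pos hcond] at hr
      refine ih p ?_ r hr
      right
      refine ⟨hcond.1, hcond.2.1, hcond.2.2.1, hcond.2.2.2.1, ?_⟩
      have hb0 : pvVal m b0.1 b0.2 ≤ pvVal m c.1 c.2 := by
        rcases h with rfl | h
        · exact le_refl _
        · exact le_of_lt h.2.2.2.2
      exact lt_of_lt_of_le hcond.2.2.2.2 hb0
    · rw [if_neg hcond] at hr
      exact ih b0 h r hr

lemma pvBest_cases (m : List (List Int)) (c : Int × Int) :
    pvBest m c = c ∨
      (0 ≤ (pvBest m c).1 ∧ (pvBest m c).1 < (m.length : Int) ∧ 0 ≤ (pvBest m c).2 ∧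
        (pvBest m c).2 < pvRowLen m c.1 ∧
        pvVal m (pvBest m c).1 (pvBest m c).2 < pvVal m c.1 c.2) := by
  exact pvBestFoldAux m c _ c (Or.inl rfl) (pvBest m c) rfl

lemma pvBest_mem (m : List (List Int)) (hPre : Pre_find_basins m) {c : Int × Int}
    (hc : c ∈ pvCells m) (hne : pvBest m c ≠ c) :
    pvBest m c ∈ pvCells m ∧ pvVal m (pvBest m c).1 (pvBest m c).2 < pvVal m c.1 c.2 := by
  rcases pvBest_cases m c with h | ⟨h1, h2, h3, h4, h5⟩
  · exact absurd h hne
  · refine ⟨?_, h5⟩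
    obtain ⟨ic, jc, hic, hjc, rfl⟩ := (mem_pvCells m c).mp hc
    rw [mem_pvCells]
    have h4' : (pvBest m ((ic : Int), (jc : Int))).2 < ((m.getD ic []).length : Int) := by
      simpa [pvRowLen] using h4
    have hib : (pvBest m ((ic : Int), (jc : Int))).1.toNat < m.length := by omega
    refine ⟨(pvBest m ((ic : Int), (jc : Int))).1.toNat,
      (pvBest m ((ic : Int), (jc : Int))).2.toNat, hib, ?_, ?_⟩
    · have e1 := pvRowLen_const m hPre ic hic
      have e2 := pvRowLen_const m hPre _ hib
      omega
    · rw [Int.toNat_of_nonneg h1, Int.toNat_of_nonneg h3]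

lemma pvFilter_length_lt {α : Type} (l : List α) (p q : α → Bool)
    (himp : ∀ x ∈ l, q x = true → p x = true) (w : α) (hw : w ∈ l)
    (hp : p w = true) (hq : q w = false) :
    (l.filter q).length < (l.filter p).length := by
  rw [← List.countP_eq_length_filter, ← List.countP_eq_length_filter]
  induction l with
  | nil => cases hw
  | cons x xs ih =>
    rw [List.countP_cons, List.countP_cons]
    rcases List.mem_cons.mp hw with rfl | hw'
    · have hle : xs.countP q ≤ xs.countP p :=
        List.countP_mono_left (fun a ha => himp a (List.mem_cons_of_mem _ ha))
      rw [hp, hq]; simp; omega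
    · have := ih (fun a ha => himp a (List.mem_cons_of_mem _ ha)) hw'
      by_cases hqx : q x = true
      · rw [hqx, himp x List.mem_cons_self hqx]; omega
      · rw [Bool.not_eq_true] at hqx
        rw [hqx]; simp only [Bool.false_eq_true, if_false]
        split <;> omega

lemma pvRank_lt (m : List (List Int)) (hPre : Pre_find_basins m) {c : Int × Int}
    (hc : c ∈ pvCells m) (hne : pvBest m c ≠ c) :
    pvRank m (pvBest m c) < pvRank m c := by
  obtain ⟨hmem, hval⟩ := pvBest_mem m hPre hc hne
  unfold pvRank
  apply pvFilter_length_lt (pvCells m) _ _ ?_ (pvBest m c) hmem ?_ ?_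
  · intro x hx h
    simp only [decide_eq_true_eq] at *
    exact lt_trans h hval
  · simpa using hval
  · simp

lemma pvCells_length (m : List (List Int)) :
    (pvCells m).length = (m.map List.length).sum := by
  simp only [pvCells, List.length_flatMap, List.length_map]
  congr 1
  apply List.ext_getElem
  · simp
  · intro i h1 h2
    simp [List.getElem?_eq_getElem (show i < m.length by simpa using h2)]

lemma pvRank_lt_fuel (m : List (List Int)) (c : Int × Int) : pvRank m c < pvFuel m := by
  have h1 : pvRank m c ≤ (pvCells m).length := List.length_filter_le _ _
  rw [pvCells_length] at h1
  unfold pvFuel; omega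

lemma pvChase_stable (m : List (List Int)) (hPre : Pre_find_basins m) :
    ∀ (r : Nat) (c : Int × Int), c ∈ pvCells m → pvRank m c ≤ r →
      ∀ f1 f2 : Nat, pvRank m c < f1 → pvRank m c < f2 → pvChase m f1 c = pvChase m f2 c := by
  intro r
  induction r with
  | zero =>
    intro c hc hr f1 f2 h1 h2
    obtain ⟨a, rfl⟩ := Nat.exists_eq_succ_of_ne_zero (by omega : f1 ≠ 0)
    obtain ⟨b, rfl⟩ := Nat.exists_eq_succ_of_ne_zero (by omega : f2 ≠ 0)
    simp only [pvChase]
    by_cases hbe : pvBest m c = c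
    · simp [hbe]
    · exact absurd (pvRank_lt m hPre hc hbe) (by omega)
  | succ r ih =>
    intro c hc hr f1 f2 h1 h2
    obtain ⟨a, rfl⟩ := Nat.exists_eq_succ_of_ne_zero (by omega : f1 ≠ 0)
    obtain ⟨b, rfl⟩ := Nat.exists_eq_succ_of_ne_zero (by omega : f2 ≠ 0)
    simp only [pvChase]
    by_cases hbe : pvBest m c = c
    · simp [hbe]
    · simp only [hbe, if_false]
      have hmem := (pvBest_mem m hPre hc hbe).1
      have hlt := pvRank_lt m hPre hc hbe
      exact ih _ hmem (by omega) a b (by omega) (by omega)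

lemma pvBasin_fix (m : List (List Int)) {c : Int × Int} (h : pvBest m c = c) :
    pvBasin m c = c := by
  unfold pvBasin pvFuel pvChase
  simp [h]

lemma pvBasin_step (m : List (List Int)) (hPre : Pre_find_basins m) {c : Int × Int}
    (hc : c ∈ pvCells m) (hne : pvBest m c ≠ c) :
    pvBasin m c = pvBasin m (pvBest m c) := by
  have hmem := (pvBest_mem m hPre hc hne).1
  unfold pvBasin
  have hfuel : pvFuel m = ((m.map List.length).sum) + 1 := rfl
  rw [hfuel]
  conv_lhs => rw [pvChase]
  rw [if_neg hne]
  apply pvChase_stable m hPre (pvRank m (pvBest m c)) _ hmem le_rfl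
  · have := pvRank_lt m hPre hc hne
    have h2 : pvRank m c < pvFuel m := pvRank_lt_fuel m c
    rw [hfuel] at h2; omega
  · rw [← hfuel]; exact pvRank_lt_fuel m _

lemma pvInv_writePath (m : List (List Int)) (b : Int × Int) :
    ∀ (path : List (Int × Int)) (root), pvInv m root → (∀ q ∈ path, pvBasin m q = b) →
      pvInv m (path.foldl (fun r c => r.insert c b) root) := by
  intro path
  induction path with
  | nil => intro root h _; exact h
  | cons x xs ih =>
    intro root hroot hb
    simp only [List.foldl_cons]
    refine ih _ ?_ (fun q hq => hb q (List.mem_cons_of_mem _ hq))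
    intro c v hv
    rw [PySem.Dict.get?_insert] at hv
    split_ifs at hv with hcx
    · cases hv; subst hcx; exact (hb _ List.mem_cons_self).symm
    · exact hroot c v hv

lemma pvWalkB_spec (m : List (List Int)) (hPre : Pre_find_basins m) :
    ∀ (fuel : Nat) (root : PySem.Dict (Int × Int) (Int × Int)) (c : Int × Int)
      (path : List (Int × Int)), c ∈ pvCells m → pvRank m c < fuel → pvInv m root →
      (∀ q ∈ path, pvBasin m q = pvBasin m c) →
      (pvWalkB m fuel root c path).2 = pvBasin m c ∧ pvInv m (pvWalkB m fuel root c path).1 := by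
  intro fuel
  induction fuel with
  | zero => intro root c path _ hr; omega
  | succ fuel ih =>
    intro root c path hc hrank hInv hpath
    cases hroot : root.get? c with
    | some b =>
      have hb : b = pvBasin m c := hInv c b hroot
      simp only [pvWalkB, hroot]
      refine ⟨hb, ?_⟩
      exact pvInv_writePath m b path root hInv (fun q hq => (hpath q hq).trans hb.symm)
    | none =>
      by_cases hbe : pvBest m c = c
      · have hfix : pvBasin m c = c := pvBasin_fix m hbe
        simp only [pvWalkB, hroot, hbe, if_pos]
        refine ⟨hfix.symm, ?_⟩
        apply pvInv_writePath m c path _ ?_ (fun q hq => (hpath q hq).trans hfix)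
        intro q v hv
        rw [PySem.Dict.get?_insert] at hv
        split_ifs at hv with hqc
        · cases hv; subst hqc; exact hfix.symm
        · exact hInv q v hv
      · have hmem := (pvBest_mem m hPre hc hbe).1
        have hlt := pvRank_lt m hPre hc hbe
        have hstep := pvBasin_step m hPre hc hbe
        simp only [pvWalkB, hroot, hbe]
        have := ih root (pvBest m c) (path ++ [c]) hmem (by omega) hInv ?_
        · exact ⟨this.1.trans hstep.symm, this.2⟩
        · intro q hq
          rcases List.mem_append.mp hq with hq' | hq'
          · exact (hpath q hq').trans hstep
          · rw [List.mem_singleton.mp hq']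
            exact hstep

lemma pvRowLen_natCast (m : List (List Int)) (i : Nat) :
    pvRowLen m (i : Int) = ((m.getD i []).length : Int) := by
  simp [pvRowLen]

lemma pvNested_eq_cells_fold {σ : Type} (m : List (List Int)) (F : σ → (Int × Int) → σ) (s0 : σ) :
    (PySem.List.pyRange 0 (m.length : Int) 1).foldl (fun s row =>
      (PySem.List.pyRange 0 (pvRowLen m row) 1).foldl (fun s col => F s (row, col)) s) s0
    = (pvCells m).foldl F s0 := by
  unfold pvCells
  rw [List.foldl_flatMap, PySem.List.pyRange_zero_nat, List.foldl_map]
  have hbody : (fun (s : σ) (i : Nat) =>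
        (PySem.List.pyRange 0 (pvRowLen m (i : Int)) 1).foldl (fun s col => F s ((i : Int), col)) s)
      = (fun (s : σ) (i : Nat) =>
        ((List.range (m.getD i []).length).map (fun j => ((i : Int), (j : Int)))).foldl F s) := by
    funext s i
    rw [pvRowLen_natCast, PySem.List.pyRange_zero_nat, List.foldl_map, List.foldl_map]
    simp [← List.map_eq_flatMap, List.foldl_map]
  rw [hbody]

lemma pvB_fold (m : List (List Int)) (hPre : Pre_find_basins m) :
    ∀ (cs : List (Int × Int)) (root : PySem.Dict (Int × Int) (Int × Int))
      (counts : PySem.Dict (Int × Int) Int), (∀ c ∈ cs, c ∈ pvCells m) → pvInv m root →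
      (cs.foldl (fun st c =>
          ((pvWalkB m (pvFuel m) st.1 c []).1,
           st.2.insert (pvWalkB m (pvFuel m) st.1 c []).2
             (st.2.getD (pvWalkB m (pvFuel m) st.1 c []).2 0 + 1))) (root, counts)).2
      = (cs.map (pvBasin m)).foldl (fun d k => d.insert k (d.getD k 0 + 1)) counts := by
  intro cs
  induction cs with
  | nil => intro root counts _ _; rfl
  | cons c cs ih =>
    intro root counts hmem hInv
    obtain ⟨hval, hInv'⟩ := pvWalkB_spec m hPre (pvFuel m) root c []
      (hmem c List.mem_cons_self) (pvRank_lt_fuel m c) hInv (by simp)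
    simp only [List.foldl_cons, List.map_cons]
    rw [hval]
    exact ih _ _ (fun q hq => hmem q (List.mem_cons_of_mem _ hq)) hInv'

lemma find_basins_eq_counter (m : List (List Int)) :
    find_basins m = PySem.List.sorted (PySem.Dict.counter (pvKeyList m)).values (fun v => v) false := by
  simp only [find_basins]
  rw [pvNested_eq_cells_fold m
    (fun (basins : PySem.Dict (Int × Int) Int) c =>
      basins.modify (pvFindBasinA m (pvFuel m) c) 0 (· + 1)) PySem.Dict.empty]
  rw [PySem.List.foldl_append_singleton_eq_map (fun kv : (Int × Int) × Int => kv.2)]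
  rw [List.nil_append]
  have hkeys : (pvCells m).foldl
      (fun (basins : PySem.Dict (Int × Int) Int) c =>
        basins.modify (pvFindBasinA m (pvFuel m) c) 0 (· + 1)) PySem.Dict.empty
      = PySem.Dict.counter (pvKeyList m) := by
    rw [PySem.Dict.counter_eq_foldl, pvKeyList, List.foldl_map]
    simp only [pvFindBasinA_eq_chase m, pvBasin]
  rw [hkeys]
  rfl

lemma find_basins_alt_eq_counter (m : List (List Int)) (hPre : Pre_find_basins m) :
    find_basins_alt m = PySem.List.sorted (PySem.Dict.counter (pvKeyList m)).values (fun v => v) false := by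
  simp only [find_basins_alt]
  rw [pvNested_eq_cells_fold m
    (fun (st : PySem.Dict (Int × Int) (Int × Int) × PySem.Dict (Int × Int) Int) c =>
      ((pvWalkB m (pvFuel m) st.1 c []).1,
       st.2.insert (pvWalkB m (pvFuel m) st.1 c []).2
         (st.2.getD (pvWalkB m (pvFuel m) st.1 c []).2 0 + 1)))
    (PySem.Dict.empty, PySem.Dict.empty)]
  rw [pvB_fold m hPre (pvCells m) PySem.Dict.empty PySem.Dict.empty (fun c hc => hc)
    (by intro c b h; rw [PySem.Dict.get?_empty] at h; cases h)]
  rw [show (pvCells m).map (pvBasin m) = pvKeyList m from rfl,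
    PySem.Dict.foldl_insert_getD_add_one_eq_counter]

-- ===== VERDICT (by name: the statement is the Claim_ definition above) =====
theorem find_basins_spec : Claim_equal_find_basins := by
  intro m _hDom hPre
  unfold Spec_find_basins
  rw [find_basins_eq_counter, find_basins_alt_eq_counter m hPre]
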